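-- pv_equiv track=rewrite | github.com/ninepig/leecode_dd_2024 | Array/slidingWindowsArray/notFixWindows/maxSubarrayBount795.py | numSubarrayMaxK
-- ===== SOURCE A (Python) =====
-- def numSubarrayMaxK(nums, k):
--     ans = 0
--     count = 0
--     for i in range(len(nums)):
--         if nums[i] <= k:
--             count += 1
--         else:
--             count = 0
--         ans += count
--     return ans
-- ===== SOURCE B (Python) =====
-- def numSubarrayMaxK(nums, k):
--     ans = 0
--     run = 0
--     for x in nums:
--         if x <= k:
--             run += 1
--         else:
--             ans += run * (run + 1) // 2
--             run = 0
--     return ans + run * (run + 1) // 2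
-- ===== Notes on version B (the rewrite author's own statement) =====
-- stated objective: alternative
-- what changed: Instead of adding the running count of trailing good elements at every position, B accumulates each maximal run of elements <= k and adds its triangular number L*(L+1)//2 per segment.
import Mathlib
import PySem

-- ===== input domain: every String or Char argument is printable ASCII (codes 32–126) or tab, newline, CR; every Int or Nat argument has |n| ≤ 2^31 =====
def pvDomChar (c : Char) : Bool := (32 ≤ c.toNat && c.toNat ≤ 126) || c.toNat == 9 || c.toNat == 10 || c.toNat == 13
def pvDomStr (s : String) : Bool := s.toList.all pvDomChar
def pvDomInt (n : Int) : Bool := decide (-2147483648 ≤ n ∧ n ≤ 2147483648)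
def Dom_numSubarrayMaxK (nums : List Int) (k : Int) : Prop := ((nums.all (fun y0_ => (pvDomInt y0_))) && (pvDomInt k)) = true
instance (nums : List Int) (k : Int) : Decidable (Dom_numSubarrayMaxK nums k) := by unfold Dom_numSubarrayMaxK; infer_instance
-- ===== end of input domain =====

-- B replaces A's per-element running-count accumulation with per-segment triangular-number contributions.


-- ===== PORT A =====
-- state = (ans, count); each step updates count then adds it to ans
def numSubarrayMaxK (nums : List Int) (k : Int) : Int :=
  (nums.foldl
    (fun (st : Int × Int) x =>
      let count := if x ≤ k then st.2 + 1 else 0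
      (st.1 + count, count))
    (0, 0)).1

-- ===== PORT B =====
-- triangular number of a finished run, run*(run+1)//2
def pvTri (run : Int) : Int := PySem.Int.floordiv (run * (run + 1)) 2

-- state = (ans, run); a run's contribution is added only when the run ends, plus once after the loop
def numSubarrayMaxK_alt (nums : List Int) (k : Int) : Int :=
  let s := nums.foldl
    (fun (st : Int × Int) x =>
      if x ≤ k then (st.1, st.2 + 1) else (st.1 + pvTri st.2, 0))
    (0, 0)
  s.1 + pvTri s.2

-- ===== PRECONDITION & SPEC =====
def Spec_numSubarrayMaxK (nums : List Int) (k : Int) (out : Int) : Prop := out = numSubarrayMaxK_alt nums k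
instance (nums : List Int) (k : Int) (out : Int) : Decidable (Spec_numSubarrayMaxK nums k out) := by unfold Spec_numSubarrayMaxK; infer_instance

-- ===== CLAIM (what is proved, stated in full; the proofs are below) =====
def Claim_equal_numSubarrayMaxK : Prop := ∀ (nums : List Int) (k : Int), Dom_numSubarrayMaxK nums k → Spec_numSubarrayMaxK nums k (numSubarrayMaxK nums k)

-- ===== LEMMAS AND PROOFS =====
theorem pvTri_succ (L : Int) : pvTri L + (L + 1) = pvTri (L + 1) := by
  unfold pvTri
  have h : (L + 1) * (L + 1 + 1) = L * (L + 1) + 2 * (L + 1) := by ring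
  rw [PySem.Int.floordiv_eq_ediv_of_pos (by norm_num : (0:Int) < 2),
      PySem.Int.floordiv_eq_ediv_of_pos (by norm_num : (0:Int) < 2), h]
  omega

theorem pvTri_zero : pvTri 0 = 0 := by decide

theorem foldl_key (k : Int) (l : List Int) : ∀ (a L : Int),
    (l.foldl (fun (st : Int × Int) x =>
        let count := if x ≤ k then st.2 + 1 else 0
        (st.1 + count, count)) (a + pvTri L, L)).1
    = (fun s : Int × Int => s.1 + pvTri s.2)
        (l.foldl (fun (st : Int × Int) x =>
          if x ≤ k then (st.1, st.2 + 1) else (st.1 + pvTri st.2, 0)) (a, L)) := by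
  induction l with
  | nil => intro a L; simp
  | cons x xs ih =>
    intro a L
    by_cases hx : x ≤ k
    · simpa [hx, add_assoc, pvTri_succ] using ih a (L + 1)
    · simpa [hx, pvTri_zero] using ih (a + pvTri L) 0

-- ===== VERDICT (by name: the statement is the Claim_ definition above) =====
theorem numSubarrayMaxK_spec : Claim_equal_numSubarrayMaxK := by
  intro nums k _
  unfold Spec_numSubarrayMaxK numSubarrayMaxK numSubarrayMaxK_alt
  have h := foldl_key k nums 0 0
  simpa [pvTri_zero] using h
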